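-- pv_equiv track=rewrite | github.com/nichitatrifan/leet_code_python | algorithm_labs/m_smallest_from_arr.py | m_smallest_numbers
-- ===== SOURCE A (Python) =====
-- from typing import List
--
-- def m_smallest_numbers(my_list:List, m:int):
--     for i in range(len(my_list)):
--         smallest_index = i
--         for j in range(i,len(my_list)):
--             if my_list[j] < my_list[smallest_index]:
--                 smallest_index = j
--         my_list[i], my_list[smallest_index] = my_list[smallest_index], my_list[i]
--     return my_list[:m]
-- ===== SOURCE B (Python) =====
-- def m_smallest_numbers(my_list, m):
--     my_list.sort()
--     return my_list[:m]
-- ===== Notes on version B (the rewrite author's own statement) =====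
-- stated objective: idiomatic
-- what changed: Replaces the hand-written O(n^2) selection sort with an in-place library sort (my_list.sort(), preserving A's mutation of the argument) followed by the same slice my_list[:m].
import Mathlib
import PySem

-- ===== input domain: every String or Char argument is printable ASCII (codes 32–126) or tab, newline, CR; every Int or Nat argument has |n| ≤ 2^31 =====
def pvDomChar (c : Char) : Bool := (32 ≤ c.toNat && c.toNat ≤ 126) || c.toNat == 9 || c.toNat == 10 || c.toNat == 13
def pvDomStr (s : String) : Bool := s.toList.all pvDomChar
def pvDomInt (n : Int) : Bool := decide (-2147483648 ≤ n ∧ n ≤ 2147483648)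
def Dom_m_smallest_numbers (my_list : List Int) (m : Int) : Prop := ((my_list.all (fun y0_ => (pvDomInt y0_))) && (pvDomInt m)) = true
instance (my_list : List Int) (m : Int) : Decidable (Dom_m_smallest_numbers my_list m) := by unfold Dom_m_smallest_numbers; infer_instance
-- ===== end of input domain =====

-- B replaces A's hand-written selection sort with an in-place library sort plus the same slice
-- (more idiomatic; equivalence is about the RETURN value — both versions also mutate the argument
-- into the same fully sorted ascending list).


-- ===== PORT A =====
-- inner loop: for j in range(i, len): if my_list[j] < my_list[smallest_index]: smallest_index = j
def pvArgmin (l : List Int) (i n : Nat) : Nat :=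
  (List.range' i (n - i)).foldl (fun s j => if l.getD j 0 < l.getD s 0 then j else s) i

-- my_list[i], my_list[smallest_index] = my_list[smallest_index], my_list[i]
def pvSwap (l : List Int) (i s : Nat) : List Int :=
  (l.set i (l.getD s 0)).set s (l.getD i 0)

def m_smallest_numbers (my_list : List Int) (m : Int) : List Int :=
  let n := my_list.length
  let final := (List.range n).foldl (fun l i => pvSwap l i (pvArgmin l i n)) my_list
  PySem.List.slice final none (some m)

-- ===== PORT B =====
def m_smallest_numbers_alt (my_list : List Int) (m : Int) : List Int :=
  PySem.List.slice (PySem.List.sorted my_list (fun x => x) false) none (some m)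

-- ===== PRECONDITION & SPEC =====
def Spec_m_smallest_numbers (my_list : List Int) (m : Int) (out : List Int) : Prop := out = m_smallest_numbers_alt my_list m
instance (my_list : List Int) (m : Int) (out : List Int) : Decidable (Spec_m_smallest_numbers my_list m out) := by unfold Spec_m_smallest_numbers; infer_instance

-- ===== CLAIM (what is proved, stated in full; the proofs are below) =====
def Claim_equal_m_smallest_numbers : Prop := ∀ (my_list : List Int) (m : Int), Dom_m_smallest_numbers my_list m → Spec_m_smallest_numbers my_list m (m_smallest_numbers my_list m)

-- ===== LEMMAS AND PROOFS =====

-- t[k] pulled to the front while t receives x at position k is a permutation of x :: t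
theorem pv_cons_set_perm (t : List Int) : ∀ (k : Nat) (x : Int), k < t.length →
    (t.getD k 0 :: t.set k x).Perm (x :: t) := by
  induction t with
  | nil => intro k x h; simp at h
  | cons y t ih =>
    intro k x h
    cases k with
    | zero => simpa using List.Perm.swap x y t
    | succ k =>
      have hk : k < t.length := by simpa using h
      have h1 : (t.getD k 0 :: y :: t.set k x).Perm (y :: t.getD k 0 :: t.set k x) :=
        List.Perm.swap y (t.getD k 0) (t.set k x)
      have h2 : (y :: t.getD k 0 :: t.set k x).Perm (y :: x :: t) :=
        List.Perm.cons y (ih k x hk)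
      have h3 : (y :: x :: t).Perm (x :: y :: t) := List.Perm.swap x y t
      simpa using (h1.trans h2).trans h3

theorem pvSwap_perm (l : List Int) : ∀ (i s : Nat), i < l.length → s < l.length →
    (pvSwap l i s).Perm l := by
  induction l with
  | nil => intro i s h; simp at h
  | cons x t ih =>
    intro i s hi hs
    cases i with
    | zero =>
      cases s with
      | zero => simp [pvSwap]
      | succ s =>
        have hs' : s < t.length := by simpa using hs
        have := pv_cons_set_perm t s x hs'
        simpa [pvSwap] using this
    | succ i =>
      cases s with
      | zero =>
        have hi' : i < t.length := by simpa using hi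
        have := pv_cons_set_perm t i x hi'
        simpa [pvSwap] using this
      | succ s =>
        have hi' : i < t.length := by simpa using hi
        have hs' : s < t.length := by simpa using hs
        have := ih i s hi' hs'
        simpa [pvSwap] using List.Perm.cons x this

theorem pvSwap_length (l : List Int) (i s : Nat) : (pvSwap l i s).length = l.length := by
  simp [pvSwap]

theorem pvSwap_getD (l : List Int) (i s q : Nat) (hq : q < l.length) :
    (pvSwap l i s).getD q 0 =
      if q = s then l.getD i 0 else if q = i then l.getD s 0 else l.getD q 0 := by
  have hq1 : q < (pvSwap l i s).length := by rw [pvSwap_length]; exact hq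
  have hq2 : q < (l.set i (l.getD s 0)).length := by simpa using hq
  rw [List.getD_eq_getElem _ _ hq1]
  show ((l.set i (l.getD s 0)).set s (l.getD i 0))[q]'_ = _
  rw [List.getElem_set, List.getElem_set]
  by_cases h1 : q = s
  · simp [h1]
  · by_cases h2 : q = i
    · subst h2
      rcases eq_or_ne s q with h | h
      · simp [h]
      · simp [h1, h]
    · simp [h1, h2, Ne.symm h1, Ne.symm h2, List.getElem?_eq_getElem hq]

-- specification of the inner argmin fold
theorem pvArgmin_fold (l : List Int) : ∀ (k a s : Nat),
    (((List.range' a k).foldl (fun s j => if l.getD j 0 < l.getD s 0 then j else s) s) = s ∨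
      (a ≤ ((List.range' a k).foldl (fun s j => if l.getD j 0 < l.getD s 0 then j else s) s) ∧
       ((List.range' a k).foldl (fun s j => if l.getD j 0 < l.getD s 0 then j else s) s) < a + k)) ∧
    l.getD ((List.range' a k).foldl (fun s j => if l.getD j 0 < l.getD s 0 then j else s) s) 0 ≤ l.getD s 0 ∧
    (∀ j, a ≤ j → j < a + k →
      l.getD ((List.range' a k).foldl (fun s j => if l.getD j 0 < l.getD s 0 then j else s) s) 0 ≤ l.getD j 0) := by
  intro k
  induction k with
  | zero => intro a s; refine ⟨Or.inl rfl, le_refl _, ?_⟩; intro j h1 h2; omega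
  | succ k ih =>
    intro a s
    rw [List.range'_succ, List.foldl_cons]
    obtain ⟨hpos, hle, hmin⟩ := ih (a + 1) (if l.getD a 0 < l.getD s 0 then a else s)
    set f := (if l.getD a 0 < l.getD s 0 then a else s) with hf
    have hfle : l.getD f 0 ≤ l.getD s 0 := by
      rw [hf]; split_ifs with h
      · exact le_of_lt h
      · exact le_refl _
    have hfa : l.getD f 0 ≤ l.getD a 0 := by
      rw [hf]; split_ifs with h
      · exact le_refl _
      · exact le_of_not_gt h
    refine ⟨?_, le_trans hle hfle, ?_⟩
    · rcases hpos with h | h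
      · rw [h, hf]; split_ifs with hc
        · right; omega
        · left; rfl
      · right; omega
    · intro j hj1 hj2
      rcases Nat.eq_or_lt_of_le hj1 with h | h
      · exact le_trans hle (h ▸ hfa)
      · exact hmin j h (by omega)

theorem pvArgmin_spec (l : List Int) (i n : Nat) (hi : i < n) :
    i ≤ pvArgmin l i n ∧ pvArgmin l i n < n ∧
    (∀ j, i ≤ j → j < n → l.getD (pvArgmin l i n) 0 ≤ l.getD j 0) := by
  obtain ⟨hpos, _, hmin⟩ := pvArgmin_fold l (n - i) i i
  have hin : i + (n - i) = n := by omega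
  unfold pvArgmin
  constructor
  · rcases hpos with h | h
    · omega
    · omega
  constructor
  · rcases hpos with h | h
    · omega
    · omega
  · intro j h1 h2; exact hmin j h1 (by omega)

-- loop invariant: length preserved, state is a permutation of the input,
-- and positions below i are sorted and below everything that follows
def pvInv (xs : List Int) (i : Nat) (l : List Int) : Prop :=
  l.length = xs.length ∧ l.Perm xs ∧
  ∀ p q : Nat, p ≤ q → p < i → q < xs.length → l.getD p 0 ≤ l.getD q 0

theorem pvStep_inv (xs l : List Int) (i : Nat) (hinv : pvInv xs i l) (hi : i < xs.length) :
    pvInv xs (i + 1) (pvSwap l i (pvArgmin l i xs.length)) := by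
  obtain ⟨hlen, hperm, hord⟩ := hinv
  obtain ⟨hs1, hs2, hmin⟩ := pvArgmin_spec l i xs.length hi
  set s := pvArgmin l i xs.length with hs
  have hil : i < l.length := by omega
  have hsl : s < l.length := by omega
  refine ⟨by rw [pvSwap_length]; exact hlen, (pvSwap_perm l i s hil hsl).trans hperm, ?_⟩
  intro p q hpq hp hq
  have hpl : p < l.length := by omega
  have hql : q < l.length := by omega
  rw [pvSwap_getD l i s p hpl, pvSwap_getD l i s q hql]
  by_cases hpi : p < i
  · -- p strictly below i: untouched by the swap
    have hps : p ≠ s := by omega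
    have hpi' : p ≠ i := by omega
    simp only [hps, hpi', if_false]
    split_ifs with h1 h2
    · exact hord p i (by omega) hpi hi
    · exact hord p s (by omega) hpi (by omega)
    · exact hord p q hpq hpi hq
  · -- p = i : the new element at i is the minimum of the suffix
    have hpe : p = i := by omega
    have hlp : (if p = s then l.getD i 0 else if p = i then l.getD s 0 else l.getD p 0) = l.getD s 0 := by
      by_cases hps : p = s
      · have his : i = s := by rw [← hpe]; exact hps
        rw [if_pos hps, his]
      · rw [if_neg hps, if_pos hpe]
    rw [hlp]
    split_ifs with h1 h2
    · exact hmin i (le_refl _) hi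
    · exact le_refl _
    · exact hmin q (by omega) hq

theorem pvFold_inv (xs : List Int) : ∀ (k : Nat), k ≤ xs.length →
    pvInv xs k ((List.range k).foldl (fun l i => pvSwap l i (pvArgmin l i xs.length)) xs) := by
  intro k
  induction k with
  | zero =>
    intro _
    exact ⟨rfl, List.Perm.refl xs, fun p q _ hp _ => absurd hp (Nat.not_lt_zero p)⟩
  | succ k ih =>
    intro hk
    rw [List.range_succ, List.foldl_append, List.foldl_cons, List.foldl_nil]
    exact pvStep_inv xs _ k (ih (by omega)) (by omega)

theorem pvSel_eq_sorted (xs : List Int) :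
    PySem.List.sorted xs (fun x => x) false =
      (List.range xs.length).foldl (fun l i => pvSwap l i (pvArgmin l i xs.length)) xs := by
  obtain ⟨hlen, hperm, hord⟩ := pvFold_inv xs xs.length (le_refl _)
  set final := (List.range xs.length).foldl (fun l i => pvSwap l i (pvArgmin l i xs.length)) xs
  have hpw : final.Pairwise (· ≤ ·) := by
    rw [List.pairwise_iff_getElem]
    intro p q hp hq hpq
    have h := hord p q (le_of_lt hpq) (by omega) (by omega)
    rwa [List.getD_eq_getElem _ _ hp, List.getD_eq_getElem _ _ hq] at h
  exact PySem.List.sorted_id_eq_of_perm_of_pairwise xs final hperm hpw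

-- ===== VERDICT (by name: the statement is the Claim_ definition above) =====
theorem m_smallest_numbers_spec : Claim_equal_m_smallest_numbers := by
  intro my_list m _
  unfold Spec_m_smallest_numbers m_smallest_numbers m_smallest_numbers_alt
  rw [pvSel_eq_sorted my_list]
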